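-- pv_equiv track=rewrite | github.com/ignasilm/hashcode21_practice | pizzeria.py | crear_equipos2
-- ===== SOURCE A (Python) =====
-- def crear_equipos2(total_pizzas, nEq2, nEq3, nEq4):
--     pizzas_restantes = total_pizzas
--     equipos = []
--
--     for t in range(nEq4):
--         if (pizzas_restantes - 4) > 4 or (pizzas_restantes - 4) == 0 \
--             or ((pizzas_restantes - 4) == 3 and int(nEq3) > 0) \
--             or ((pizzas_restantes - 4) == 2 and int(nEq2) > 0):
--             equipos.append(4)
--             pizzas_restantes = pizzas_restantes - 4
--
--     for t in range(nEq3):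
--         if (pizzas_restantes - 3) > 3 or (pizzas_restantes - 3) == 0 \
--             or ((pizzas_restantes - 3) == 2 and int(nEq2) > 0):
--             equipos.append(3)
--             pizzas_restantes = pizzas_restantes - 3
--
--     for t in range(nEq2):
--         if (pizzas_restantes - 2) > 2 or (pizzas_restantes - 2) == 0:
--             equipos.append(2)
--             pizzas_restantes = pizzas_restantes - 2
--
--     equipos.sort()
--
--     return equipos
-- ===== SOURCE B (Python) =====
-- def crear_equipos2(total_pizzas, nEq2, nEq3, nEq4):
--     # Closed-form count of appends per phase; emit already in sorted order (no sort).
--     def phase(p, n, s, extras):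
--         # number of appends performed by a loop of n iterations that appends while
--         # p - s > s or p - s == 0 or (p - s) in extras (each append subtracts s).
--         if n <= 0:
--             return 0
--         k0 = max(0, (p - s - 1) // s)   # iterations taken via the p - s > s branch
--         if k0 >= n:
--             return n
--         q = p - s * k0                   # budget when that branch first fails
--         if q - s == 0 or (q - s) in extras:
--             return k0 + 1                # exactly one more append, then it stops
--         return k0
--
--     extras4 = ([3] if nEq3 > 0 else []) + ([2] if nEq2 > 0 else [])
--     c4 = phase(total_pizzas, nEq4, 4, extras4)
--     c3 = phase(total_pizzas - 4 * c4, nEq3, 3, [2] if nEq2 > 0 else [])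
--     c2 = phase(total_pizzas - 4 * c4 - 3 * c3, nEq2, 2, [])
--     return [2] * c2 + [3] * c3 + [4] * c4
-- ===== Notes on version B (the rewrite author's own statement) =====
-- stated objective: faster
-- what changed: B replaces A's three per-team-count loops (up to nEq4+nEq3+nEq2 iterations) and the final sort by a closed-form floor-division count of appends per team size, emitting the blocks of 2s, 3s, 4s already in sorted order.
import Mathlib
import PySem

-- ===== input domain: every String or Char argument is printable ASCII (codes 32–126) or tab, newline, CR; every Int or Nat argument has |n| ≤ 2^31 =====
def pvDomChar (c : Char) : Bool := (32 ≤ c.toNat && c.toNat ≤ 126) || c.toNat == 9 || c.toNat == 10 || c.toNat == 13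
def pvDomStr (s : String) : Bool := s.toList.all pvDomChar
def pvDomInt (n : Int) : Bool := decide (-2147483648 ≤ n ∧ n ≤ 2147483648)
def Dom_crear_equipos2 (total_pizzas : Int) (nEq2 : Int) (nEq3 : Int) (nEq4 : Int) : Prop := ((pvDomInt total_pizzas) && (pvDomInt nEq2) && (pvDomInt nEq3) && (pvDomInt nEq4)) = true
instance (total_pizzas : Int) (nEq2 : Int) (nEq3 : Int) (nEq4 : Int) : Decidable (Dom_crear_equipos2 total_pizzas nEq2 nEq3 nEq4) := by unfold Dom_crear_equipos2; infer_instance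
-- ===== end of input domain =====

-- B replaces A's per-team loops and final sort by a closed-form count of appends per
-- team size, emitting the result already sorted (objective: faster, O(output size)).


-- ===== PORT A =====
def crear_equipos2 (total_pizzas : Int) (nEq2 : Int) (nEq3 : Int) (nEq4 : Int) : List Int :=
  let st0 : Int × List Int := (total_pizzas, [])
  let st1 := (PySem.List.pyRange 0 nEq4 1).foldl (fun st _ =>
    if st.1 - 4 > 4 ∨ st.1 - 4 = 0 ∨ (st.1 - 4 = 3 ∧ nEq3 > 0) ∨ (st.1 - 4 = 2 ∧ nEq2 > 0)
    then (st.1 - 4, st.2 ++ [4]) else st) st0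
  let st2 := (PySem.List.pyRange 0 nEq3 1).foldl (fun st _ =>
    if st.1 - 3 > 3 ∨ st.1 - 3 = 0 ∨ (st.1 - 3 = 2 ∧ nEq2 > 0)
    then (st.1 - 3, st.2 ++ [3]) else st) st1
  let st3 := (PySem.List.pyRange 0 nEq2 1).foldl (fun st _ =>
    if st.1 - 2 > 2 ∨ st.1 - 2 = 0
    then (st.1 - 2, st.2 ++ [2]) else st) st2
  PySem.List.sorted st3.2 (fun x => x) false

-- ===== PORT B =====
-- number of appends of B's `phase` helper (closed form, no loop)
def pvPhase (p : Int) (n : Int) (s : Int) (extras : List Int) : Int :=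
  if n ≤ 0 then 0
  else
    let k0 := max 0 (PySem.Int.floordiv (p - s - 1) s)
    if k0 ≥ n then n
    else
      let q := p - s * k0
      if q - s = 0 ∨ (q - s) ∈ extras then k0 + 1 else k0

def crear_equipos2_alt (total_pizzas : Int) (nEq2 : Int) (nEq3 : Int) (nEq4 : Int) : List Int :=
  let extras4 : List Int := (if nEq3 > 0 then [3] else []) ++ (if nEq2 > 0 then [2] else [])
  let c4 := pvPhase total_pizzas nEq4 4 extras4
  let c3 := pvPhase (total_pizzas - 4 * c4) nEq3 3 (if nEq2 > 0 then [2] else [])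
  let c2 := pvPhase (total_pizzas - 4 * c4 - 3 * c3) nEq2 2 []
  List.replicate c2.toNat 2 ++ List.replicate c3.toNat 3 ++ List.replicate c4.toNat 4

-- ===== PRECONDITION & SPEC =====
def Spec_crear_equipos2 (total_pizzas : Int) (nEq2 : Int) (nEq3 : Int) (nEq4 : Int) (out : List Int) : Prop := out = crear_equipos2_alt total_pizzas nEq2 nEq3 nEq4
instance (total_pizzas : Int) (nEq2 : Int) (nEq3 : Int) (nEq4 : Int) (out : List Int) : Decidable (Spec_crear_equipos2 total_pizzas nEq2 nEq3 nEq4 out) := by unfold Spec_crear_equipos2; infer_instance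

-- ===== CLAIM (what is proved, stated in full; the proofs are below) =====
def Claim_equal_crear_equipos2 : Prop := ∀ (total_pizzas : Int) (nEq2 : Int) (nEq3 : Int) (nEq4 : Int), Dom_crear_equipos2 total_pizzas nEq2 nEq3 nEq4 → Spec_crear_equipos2 total_pizzas nEq2 nEq3 nEq4 (crear_equipos2 total_pizzas nEq2 nEq3 nEq4)

-- ===== LEMMAS AND PROOFS =====

theorem pvPhase_nonpos (p n s : Int) (extras : List Int) (hn : n ≤ 0) :
    pvPhase p n s extras = 0 := by
  unfold pvPhase; simp [hn]

-- pvPhase facts: nonnegative; the recurrence of A's loop body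
theorem pvPhase_nonneg (p n s : Int) (extras : List Int) : 0 ≤ pvPhase p n s extras := by
  unfold pvPhase
  dsimp only
  split_ifs <;> omega

theorem pvPhase_stop (p n s : Int) (extras : List Int)
    (hs : s = 2 ∨ s = 3 ∨ s = 4)
    (hc : ¬ (p - s > s ∨ p - s = 0 ∨ (p - s) ∈ extras)) :
    pvPhase p n s extras = 0 := by
  have h1 : ¬ (p - s > s) := fun h => hc (Or.inl h)
  have h2 : p - s ≠ 0 := fun h => hc (Or.inr (Or.inl h))
  have h3 : (p - s) ∉ extras := fun h => hc (Or.inr (Or.inr h))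
  have hsp : (0:Int) < s := by omega
  unfold pvPhase
  dsimp only
  rw [PySem.Int.floordiv_eq_ediv_of_pos hsp]
  have hk : max 0 ((p - s - 1) / s) = 0 := by
    rcases hs with h | h | h <;> subst h <;> omega
  rw [hk]
  split_ifs with ha hb
  · rfl
  · rcases hb with h | h
    · omega
    · exact absurd (by simpa using h) h3
  · rfl

theorem pvPhase_step (p n s : Int) (extras : List Int)
    (hs : s = 2 ∨ s = 3 ∨ s = 4)
    (hex : ∀ v ∈ extras, 0 < v ∧ v < s)
    (hn : 0 < n)
    (hc : p - s > s ∨ p - s = 0 ∨ (p - s) ∈ extras) :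
    pvPhase p n s extras = pvPhase (p - s) (n - 1) s extras + 1 := by
  have hsp : (0:Int) < s := by omega
  by_cases hbig : p - s > s
  · -- the loop is still in its budget-over-2s regime: k0 shifts down by one
    have hk1 : (1:Int) ≤ (p - s - 1) / s := by rcases hs with h | h | h <;> subst h <;> omega
    have hkshift : (p - s - s - 1) / s = (p - s - 1) / s - 1 := by
      rcases hs with h | h | h <;> subst h <;> omega
    unfold pvPhase
    dsimp only
    rw [PySem.Int.floordiv_eq_ediv_of_pos hsp, PySem.Int.floordiv_eq_ediv_of_pos hsp, hkshift]
    set k0 := (p - s - 1) / s with hk0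
    have hmax1 : max 0 k0 = k0 := by omega
    have hmax2 : max 0 (k0 - 1) = k0 - 1 := by omega
    rw [hmax1, hmax2]
    have hq : p - s - s * (k0 - 1) = p - s * k0 := by ring
    rw [hq]
    split_ifs <;> omega
  · -- condition holds through an equality case: exactly one append, then the loop stops
    have hps : 0 ≤ p - s ∧ p - s < s := by
      rcases hc with h | h | h
      · omega
      · omega
      · exact ⟨(hex _ h).1.le, (hex _ h).2⟩
    have hk : max 0 (PySem.Int.floordiv (p - s - 1) s) = 0 := by
      rw [PySem.Int.floordiv_eq_ediv_of_pos hsp]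
      rcases hs with h | h | h <;> subst h <;> omega
    have hcc : p - s * 0 - s = 0 ∨ (p - s * 0 - s) ∈ extras := by
      rcases hc with h | h | h
      · omega
      · left; omega
      · right; simpa using h
    have hfirst : pvPhase p n s extras = 1 := by
      unfold pvPhase
      dsimp only
      rw [hk]
      split_ifs with h1
      · omega
      · omega
    have hrest : pvPhase (p - s) (n - 1) s extras = 0 := by
      by_cases hn1 : n - 1 ≤ 0
      · exact pvPhase_nonpos _ _ _ _ hn1
      · refine pvPhase_stop _ _ _ _ hs ?_
        rintro (h | h | h)
        · omega
        · omega
        · exact absurd ((hex _ h).1) (by omega)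
    rw [hfirst, hrest]
    omega

-- pvPhase over a list length: folding A's loop body over any index list is the closed form
theorem pvFold_eq (s : Int) (extras : List Int) (v : Int)
    (hs : s = 2 ∨ s = 3 ∨ s = 4) (hex : ∀ w ∈ extras, 0 < w ∧ w < s) (l : List Int) :
    ∀ (p : Int) (acc : List Int),
      l.foldl (fun (st : Int × List Int) (_ : Int) =>
          if st.1 - s > s ∨ st.1 - s = 0 ∨ (st.1 - s) ∈ extras then (st.1 - s, st.2 ++ [v]) else st)
        (p, acc)
      = (p - s * pvPhase p (l.length : Int) s extras,
         acc ++ List.replicate (pvPhase p (l.length : Int) s extras).toNat v) := by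
  induction l with
  | nil =>
      intro p acc
      simp [pvPhase_nonpos p 0 s extras le_rfl]
  | cons x l ih =>
      intro p acc
      simp only [List.foldl_cons, List.length_cons]
      have hlen : ((l.length + 1 : Nat) : Int) = (l.length : Int) + 1 := by push_cast; ring
      by_cases hcond : p - s > s ∨ p - s = 0 ∨ (p - s) ∈ extras
      · rw [if_pos hcond, ih (p - s) (acc ++ [v]), hlen]
        have hn : (0:Int) < (l.length : Int) + 1 := by omega
        have hstep := pvPhase_step p ((l.length : Int) + 1) s extras hs hex hn hcond
        rw [hstep]
        have hm : ((l.length : Int) + 1) - 1 = (l.length : Int) := by ring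
        rw [hm]
        have h0 := pvPhase_nonneg (p - s) (l.length : Int) s extras
        have ht : (pvPhase (p - s) (l.length : Int) s extras + 1).toNat
            = (pvPhase (p - s) (l.length : Int) s extras).toNat + 1 := by omega
        refine Prod.ext ?_ ?_
        · dsimp only; ring
        · dsimp only
          rw [ht, List.replicate_succ, List.append_assoc]
          simp
      · rw [if_neg hcond, ih p acc, hlen]
        rw [pvPhase_stop _ _ _ _ hs hcond, pvPhase_stop _ _ _ _ hs hcond]

-- the fold length of range(n) feeds pvPhase exactly n
theorem pvPhase_len (p n s : Int) (extras : List Int) :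
    pvPhase p (((PySem.List.pyRange 0 n 1).length : Nat) : Int) s extras = pvPhase p n s extras := by
  rw [PySem.List.length_pyRange_one]
  by_cases hn : n ≤ 0
  · rw [pvPhase_nonpos _ _ _ _ hn, pvPhase_nonpos]
    omega
  · have h : (((n - 0).toNat : Nat) : Int) = n := by omega
    rw [h]

-- A's phase-4 condition written as a membership in B's extras list
theorem cond4_iff (nEq2 nEq3 q : Int) :
    (q - 4 > 4 ∨ q - 4 = 0 ∨ (q - 4 = 3 ∧ nEq3 > 0) ∨ (q - 4 = 2 ∧ nEq2 > 0)) ↔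
    (q - 4 > 4 ∨ q - 4 = 0 ∨ (q - 4) ∈ ((if nEq3 > 0 then [(3:Int)] else []) ++ (if nEq2 > 0 then [2] else []))) := by
  by_cases h3 : nEq3 > 0 <;> by_cases h2 : nEq2 > 0 <;> simp [h3, h2]

theorem cond3_iff (nEq2 q : Int) :
    (q - 3 > 3 ∨ q - 3 = 0 ∨ (q - 3 = 2 ∧ nEq2 > 0)) ↔
    (q - 3 > 3 ∨ q - 3 = 0 ∨ (q - 3) ∈ (if nEq2 > 0 then [(2:Int)] else [])) := by
  by_cases h2 : nEq2 > 0 <;> simp [h2]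

theorem cond2_iff (q : Int) :
    (q - 2 > 2 ∨ q - 2 = 0) ↔ (q - 2 > 2 ∨ q - 2 = 0 ∨ (q - 2) ∈ ([] : List Int)) := by
  simp

-- bounds on the extras lists B builds
theorem hex4 (nEq2 nEq3 : Int) :
    ∀ w ∈ ((if nEq3 > 0 then [(3:Int)] else []) ++ (if nEq2 > 0 then [2] else [])), 0 < w ∧ w < 4 := by
  by_cases h3 : nEq3 > 0 <;> by_cases h2 : nEq2 > 0 <;> simp [h3, h2]

theorem hex3 (nEq2 : Int) : ∀ w ∈ (if nEq2 > 0 then [(2:Int)] else []), 0 < w ∧ w < 3 := by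
  by_cases h2 : nEq2 > 0 <;> simp [h2]

-- permuting three concatenated blocks
theorem perm3 (x y z : List Int) : (x ++ y ++ z).Perm (z ++ y ++ x) := by
  have h1 : (x ++ y ++ z).Perm (z ++ (x ++ y)) := List.perm_append_comm
  have h2 : (z ++ (x ++ y)).Perm (z ++ (y ++ x)) := List.Perm.append_left _ List.perm_append_comm
  simpa [List.append_assoc] using h1.trans h2

-- sorting the 4s-3s-2s blocks produced by A gives B's 2s-3s-4s blocks
theorem sorted_blocks (a b c : Nat) :
    PySem.List.sorted (List.replicate a (4:Int) ++ List.replicate b 3 ++ List.replicate c 2) (fun x => x) false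
      = List.replicate c 2 ++ List.replicate b 3 ++ List.replicate a 4 := by
  apply PySem.List.sorted_id_eq_of_perm_of_pairwise
  · exact perm3 _ _ _
  · simp only [List.pairwise_append, List.mem_append, List.mem_replicate, List.pairwise_replicate]
    refine ⟨⟨?_, ?_, ?_⟩, ?_⟩ <;> intros <;> simp_all <;> omega

theorem crear_equipos2_spec : Claim_equal_crear_equipos2 := by
  intro total_pizzas nEq2 nEq3 nEq4 _hdom
  unfold Spec_crear_equipos2 crear_equipos2 crear_equipos2_alt
  dsimp only
  have hf4 : (fun (st : Int × List Int) (_ : Int) =>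
      if st.1 - 4 > 4 ∨ st.1 - 4 = 0 ∨ (st.1 - 4 = 3 ∧ nEq3 > 0) ∨ (st.1 - 4 = 2 ∧ nEq2 > 0)
      then (st.1 - 4, st.2 ++ [4]) else st)
    = (fun (st : Int × List Int) (_ : Int) =>
      if st.1 - 4 > 4 ∨ st.1 - 4 = 0 ∨ (st.1 - 4) ∈ ((if nEq3 > 0 then [(3:Int)] else []) ++ (if nEq2 > 0 then [2] else []))
      then (st.1 - 4, st.2 ++ [4]) else st) := by
    funext st t; exact if_congr (cond4_iff nEq2 nEq3 st.1) rfl rfl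
  have hf3 : (fun (st : Int × List Int) (_ : Int) =>
      if st.1 - 3 > 3 ∨ st.1 - 3 = 0 ∨ (st.1 - 3 = 2 ∧ nEq2 > 0)
      then (st.1 - 3, st.2 ++ [3]) else st)
    = (fun (st : Int × List Int) (_ : Int) =>
      if st.1 - 3 > 3 ∨ st.1 - 3 = 0 ∨ (st.1 - 3) ∈ (if nEq2 > 0 then [(2:Int)] else [])
      then (st.1 - 3, st.2 ++ [3]) else st) := by
    funext st t; exact if_congr (cond3_iff nEq2 st.1) rfl rfl
  have hf2 : (fun (st : Int × List Int) (_ : Int) =>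
      if st.1 - 2 > 2 ∨ st.1 - 2 = 0
      then (st.1 - 2, st.2 ++ [2]) else st)
    = (fun (st : Int × List Int) (_ : Int) =>
      if st.1 - 2 > 2 ∨ st.1 - 2 = 0 ∨ (st.1 - 2) ∈ ([] : List Int)
      then (st.1 - 2, st.2 ++ [2]) else st) := by
    funext st t; exact if_congr (cond2_iff st.1) rfl rfl
  rw [hf4, hf3, hf2]
  rw [pvFold_eq 4 _ 4 (by tauto) (hex4 nEq2 nEq3) _ total_pizzas [], pvPhase_len]
  rw [pvFold_eq 3 _ 3 (by tauto) (hex3 nEq2) _ _ _, pvPhase_len]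
  rw [pvFold_eq 2 _ 2 (by tauto) (by simp) _ _ _, pvPhase_len]
  simp only [List.nil_append]
  exact sorted_blocks _ _ _
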